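-- pv_equiv track=rewrite | github.com/conorosully/instantaneous-coastline-comparison | experiments.py | _experiment_number
-- ===== SOURCE A (Python) =====
-- def _experiment_number(config):
--     name = config["model_name"]
--
--     if config.get("experiment_tag") is not None:
--         return config["experiment_tag"]
--
--     if not name.startswith("LICS"):
--         return 1
--
--     architectures = {"unet", "r2_unet", "att_unet", "r2att_unet", "swed_unet"}
--     stem = name[len("LICS_"):]
--     for opt in ("adam", "adamw", "sgd"):
--         if stem.endswith(f"_{opt}"):
--             stem = stem[:-(len(opt) + 1)]
--             break
--     return 2 if stem in architectures else 3
-- ===== SOURCE B (Python) =====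
-- _VALID_STEMS = frozenset({
--     "unet", "unet_adam", "unet_adamw", "unet_sgd",
--     "r2_unet", "r2_unet_adam", "r2_unet_adamw", "r2_unet_sgd",
--     "att_unet", "att_unet_adam", "att_unet_adamw", "att_unet_sgd",
--     "r2att_unet", "r2att_unet_adam", "r2att_unet_adamw", "r2att_unet_sgd",
--     "swed_unet", "swed_unet_adam", "swed_unet_adamw", "swed_unet_sgd",
-- })
--
--
-- def _experiment_number(config):
--     name = config["model_name"]
--
--     if config.get("experiment_tag") is not None:
--         return config["experiment_tag"]
--
--     if not name.startswith("LICS"):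
--         return 1
--
--     return 2 if name[len("LICS_"):] in _VALID_STEMS else 3
-- ===== Notes on version B (the rewrite author's own statement) =====
-- stated objective: simpler
-- what changed: Replaces A's suffix-stripping loop over the optimizer tuple followed by an architecture-set test with a single membership test of the raw stem against a precomputed frozenset of the 20 valid stems (each architecture bare and with each optimizer suffix).
-- outside the precondition, e.g. on _experiment_number({'model_name': 'x', 'experiment_tag': '7'}): A returns '7', B returns '7'
import Mathlib
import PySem

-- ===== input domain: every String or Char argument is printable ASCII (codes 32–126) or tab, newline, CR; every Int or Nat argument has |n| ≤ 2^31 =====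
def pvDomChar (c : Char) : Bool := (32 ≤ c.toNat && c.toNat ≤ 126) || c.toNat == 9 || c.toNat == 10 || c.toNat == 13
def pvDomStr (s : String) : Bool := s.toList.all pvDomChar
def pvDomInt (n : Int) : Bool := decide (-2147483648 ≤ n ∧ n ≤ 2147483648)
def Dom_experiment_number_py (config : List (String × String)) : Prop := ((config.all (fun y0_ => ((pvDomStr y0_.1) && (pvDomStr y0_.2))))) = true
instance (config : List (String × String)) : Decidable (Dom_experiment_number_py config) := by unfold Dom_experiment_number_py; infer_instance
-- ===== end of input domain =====

-- B replaces A's suffix-stripping loop + architecture-set test by one membership test of the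
-- raw stem against a precomputed table of the 20 valid stems (objective: simpler).

-- ===== PORT A =====
-- A's literal set `architectures`
def pvArchsA : List String := ["unet", "r2_unet", "att_unet", "r2att_unet", "swed_unet"]

-- A's for-loop over the literal tuple ("adam", "adamw", "sgd") with break, unrolled:
-- each iteration tests `stem.endswith("_" + opt)` and on success strips the last len(opt)+1 chars
def pvStripOpt (stem : String) : String :=
  if PySem.Str.endswith stem "_adam" then PySem.Str.slice stem none (some (-5))
  else if PySem.Str.endswith stem "_adamw" then PySem.Str.slice stem none (some (-6))
  else if PySem.Str.endswith stem "_sgd" then PySem.Str.slice stem none (some (-4))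
  else stem

def experiment_number_py (config : List (String × String)) : Int :=
  match (PySem.Dict.ofList config).get? "model_name" with
  | none => 0  -- Python raises KeyError here; excluded by Pre_
  | some name =>
    if ((PySem.Dict.ofList config).get? "experiment_tag").isSome then 0
      -- Python returns the tag STRING here (not an int); excluded by Pre_
    else if !(PySem.Str.startswith name "LICS") then 1
    else if pvStripOpt (PySem.Str.slice name (some 5) none) ∈ pvArchsA then 2 else 3

-- ===== PORT B =====
-- B's precomputed frozenset of all valid experiment-2 stems (arch, and arch_opt for each optimizer)
def pvValidStems : List String :=
  ["unet", "unet_adam", "unet_adamw", "unet_sgd",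
   "r2_unet", "r2_unet_adam", "r2_unet_adamw", "r2_unet_sgd",
   "att_unet", "att_unet_adam", "att_unet_adamw", "att_unet_sgd",
   "r2att_unet", "r2att_unet_adam", "r2att_unet_adamw", "r2att_unet_sgd",
   "swed_unet", "swed_unet_adam", "swed_unet_adamw", "swed_unet_sgd"]

def experiment_number_py_alt (config : List (String × String)) : Int :=
  match (PySem.Dict.ofList config).get? "model_name" with
  | none => 0  -- Python raises KeyError here; excluded by Pre_
  | some name =>
    if ((PySem.Dict.ofList config).get? "experiment_tag").isSome then 0
      -- Python returns the tag STRING here (not an int); excluded by Pre_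
    else if !(PySem.Str.startswith name "LICS") then 1
    else if PySem.Str.slice name (some 5) none ∈ pvValidStems then 2 else 3

-- ===== PRECONDITION & SPEC =====
-- Pre_ excludes configs without a "model_name" key (Python raises KeyError) and configs with an
-- "experiment_tag" key (Python returns the tag string, which is not a value of the declared Int type).
def Pre_experiment_number_py (config : List (String × String)) : Prop :=
  "model_name" ∈ config.map Prod.fst ∧ "experiment_tag" ∉ config.map Prod.fst
instance (config : List (String × String)) : Decidable (Pre_experiment_number_py config) := by
  unfold Pre_experiment_number_py; infer_instance

def pvWitness_experiment_number_py : (List (String × String)) := [("model_name", "LICS_unet_adam")]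

def Spec_experiment_number_py (config : List (String × String)) (out : Int) : Prop := out = experiment_number_py_alt config
instance (config : List (String × String)) (out : Int) : Decidable (Spec_experiment_number_py config out) := by unfold Spec_experiment_number_py; infer_instance

-- ===== CLAIM (what is proved, stated in full; the proofs are below) =====
def Claim_equal_experiment_number_py : Prop := ∀ (config : List (String × String)), Dom_experiment_number_py config → Pre_experiment_number_py config → Spec_experiment_number_py config (experiment_number_py config)

-- ===== LEMMAS AND PROOFS =====

lemma pv_take_suffix {l A : List Char} (h : A <:+ l) :
    l.take (l.length - A.length) ++ A = l := by
  obtain ⟨p, rfl⟩ := h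
  rw [List.length_append, Nat.add_sub_cancel, List.take_left]

lemma pv_toList_injective : Function.Injective String.toList :=
  fun _ _ h => String.toList_inj.mp h

lemma pv_mem_strings (s : String) (L : List String) :
    s ∈ L ↔ s.toList ∈ L.map String.toList :=
  (List.mem_map_of_injective pv_toList_injective).symm

-- the heart of the equivalence: A's strip-then-test equals B's table lookup on every stem
lemma pv_strip_mem_iff (stem : String) :
    pvStripOpt stem ∈ pvArchsA ↔ stem ∈ pvValidStems := by
  constructor
  · intro hc
    rw [pv_mem_strings]
    unfold pvStripOpt at hc
    split_ifs at hc with h1 h2 h3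
    · simp only [PySem.Str.endswith_eq, PySem.Chars.endswith_iff] at h1
      have hS : (PySem.Str.slice stem none (some (-5))).toList
          = stem.toList.take (stem.toList.length - ("_adam".toList).length) := by
        simp only [PySem.Str.toList_slice, PySem.Chars.slice_eq_listSlice]
        rw [PySem.List.slice_to_neg_ofNat _ 5 (by omega),
          (by decide : ("_adam".toList).length = 5)]
      have hrec : stem.toList = (PySem.Str.slice stem none (some (-5))).toList ++ "_adam".toList := by
        rw [hS]; exact (pv_take_suffix h1).symm
      simp only [pvArchsA, List.mem_cons, List.not_mem_nil, or_false] at hc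
      rcases hc with h | h | h | h | h <;> rw [h] at hrec <;> rw [hrec] <;> decide
    · simp only [PySem.Str.endswith_eq, PySem.Chars.endswith_iff] at h2
      have hS : (PySem.Str.slice stem none (some (-6))).toList
          = stem.toList.take (stem.toList.length - ("_adamw".toList).length) := by
        simp only [PySem.Str.toList_slice, PySem.Chars.slice_eq_listSlice]
        rw [PySem.List.slice_to_neg_ofNat _ 6 (by omega),
          (by decide : ("_adamw".toList).length = 6)]
      have hrec : stem.toList = (PySem.Str.slice stem none (some (-6))).toList ++ "_adamw".toList := by
        rw [hS]; exact (pv_take_suffix h2).symm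
      simp only [pvArchsA, List.mem_cons, List.not_mem_nil, or_false] at hc
      rcases hc with h | h | h | h | h <;> rw [h] at hrec <;> rw [hrec] <;> decide
    · simp only [PySem.Str.endswith_eq, PySem.Chars.endswith_iff] at h3
      have hS : (PySem.Str.slice stem none (some (-4))).toList
          = stem.toList.take (stem.toList.length - ("_sgd".toList).length) := by
        simp only [PySem.Str.toList_slice, PySem.Chars.slice_eq_listSlice]
        rw [PySem.List.slice_to_neg_ofNat _ 4 (by omega),
          (by decide : ("_sgd".toList).length = 4)]
      have hrec : stem.toList = (PySem.Str.slice stem none (some (-4))).toList ++ "_sgd".toList := by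
        rw [hS]; exact (pv_take_suffix h3).symm
      simp only [pvArchsA, List.mem_cons, List.not_mem_nil, or_false] at hc
      rcases hc with h | h | h | h | h <;> rw [h] at hrec <;> rw [hrec] <;> decide
    · simp only [pvArchsA, List.mem_cons, List.not_mem_nil, or_false] at hc
      rcases hc with rfl | rfl | rfl | rfl | rfl <;> decide
  · intro hv
    simp only [pvValidStems, List.mem_cons, List.not_mem_nil, or_false] at hv
    rcases hv with rfl | rfl | rfl | rfl | rfl | rfl | rfl | rfl | rfl | rfl | rfl | rfl | rfl |
      rfl | rfl | rfl | rfl | rfl | rfl | rfl <;> decide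

-- ===== VERDICT (by name: the statement is the Claim_ definition above) =====
theorem experiment_number_py_spec : Claim_equal_experiment_number_py := by
  intro config _ _
  unfold Spec_experiment_number_py experiment_number_py experiment_number_py_alt
  cases (PySem.Dict.ofList config).get? "model_name" with
  | none => rfl
  | some name =>
    by_cases ht : ((PySem.Dict.ofList config).get? "experiment_tag").isSome
    · simp only [ht, if_true]
    · simp only [ht, Bool.false_eq_true, if_false]
      by_cases hs : PySem.Str.startswith name "LICS"
      · simp only [hs, Bool.not_true, Bool.false_eq_true, if_false]
        exact if_congr (pv_strip_mem_iff _) rfl rfl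
      · simp only [Bool.not_eq_true] at hs
        simp only [hs, Bool.not_false, if_true]
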